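-- pv_equiv track=rewrite | github.com/daniel-reich/turbo-robot | 6NoaFGKJgRW6oXhLC_12.py | sum_of_vowels
-- ===== SOURCE A (Python) =====
-- def sum_of_vowels(sentence):
--   total = 0
--   point = {'a' : 4, 'e' : 3, 'i' : 1, 'o' : 0, 'u' : 0}
--   vowels = ['a', 'e', 'i', 'o', 'u']
--   sentence = sentence.lower()
--   for x in sentence:
--     if x in vowels:
--       total += point[x]
--   return total
-- ===== SOURCE B (Python) =====
-- def sum_of_vowels(sentence):
--   s = sentence.lower()
--   return 4 * s.count('a') + 3 * s.count('e') + s.count('i')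
-- ===== Notes on version B (the rewrite author's own statement) =====
-- stated objective: faster
-- what changed: Replaces the character-by-character loop with dict lookup and membership test by a closed weighted combination of whole-string counts, dropping the vowels whose weight is 0.
import Mathlib
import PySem

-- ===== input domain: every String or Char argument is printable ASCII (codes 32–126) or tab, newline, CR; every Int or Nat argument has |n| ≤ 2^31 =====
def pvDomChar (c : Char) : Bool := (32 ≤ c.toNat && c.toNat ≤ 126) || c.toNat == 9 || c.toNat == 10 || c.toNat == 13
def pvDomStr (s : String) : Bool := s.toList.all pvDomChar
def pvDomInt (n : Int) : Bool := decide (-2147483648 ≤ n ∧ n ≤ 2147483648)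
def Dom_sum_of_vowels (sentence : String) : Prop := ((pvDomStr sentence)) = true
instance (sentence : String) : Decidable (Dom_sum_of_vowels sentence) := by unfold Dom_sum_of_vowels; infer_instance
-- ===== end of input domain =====

-- B replaces the per-character loop with a closed combination of whole-string counts (weight-0 vowels dropped); same cost, simpler.

-- ===== PORT A =====
def sum_of_vowels (sentence : String) : Int :=
  let point : PySem.Dict Char Int :=
    ((((PySem.Dict.empty.insert 'a' 4).insert 'e' 3).insert 'i' 1).insert 'o' 0).insert 'u' 0
  let vowels : List Char := ['a', 'e', 'i', 'o', 'u']
  let s := PySem.Str.lower sentence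
  s.toList.foldl (fun total x => if x ∈ vowels then total + point.getD x 0 else total) 0

-- ===== PORT B =====
def sum_of_vowels_alt (sentence : String) : Int :=
  let s := PySem.Str.lower sentence
  4 * (PySem.Str.count s "a" : Int) + 3 * (PySem.Str.count s "e" : Int) + (PySem.Str.count s "i" : Int)

-- ===== PRECONDITION & SPEC =====
def Spec_sum_of_vowels (sentence : String) (out : Int) : Prop := out = sum_of_vowels_alt sentence
instance (sentence : String) (out : Int) : Decidable (Spec_sum_of_vowels sentence out) := by unfold Spec_sum_of_vowels; infer_instance

-- ===== CLAIM (what is proved, stated in full; the proofs are below) =====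
def Claim_equal_sum_of_vowels : Prop := ∀ (sentence : String), Dom_sum_of_vowels sentence → Spec_sum_of_vowels sentence (sum_of_vowels sentence)

-- ===== LEMMAS AND PROOFS =====

-- counting a single-character substring is counting that character
theorem count_go_singleton (c : Char) :
    ∀ (l : List Char) (fuel acc : Nat), l.length ≤ fuel →
      PySem.Chars.count.go [c] fuel l acc = acc + l.count c := by
  intro l
  induction l with
  | nil => intro fuel acc _; cases fuel <;> simp [PySem.Chars.count.go]
  | cons h t ih =>
    intro fuel acc hf
    cases fuel with
    | zero => simp at hf
    | succ n =>
      simp only [PySem.Chars.count.go]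
      by_cases hc : h = c
      · subst hc
        simp [List.isPrefixOf, ih n (acc + 1) (by simpa using Nat.le_of_succ_le_succ hf)]
        omega
      · simp [List.isPrefixOf, hc, ih n acc (by simpa using Nat.le_of_succ_le_succ hf), Ne.symm hc]

theorem count_singleton (cs : List Char) (c : Char) :
    PySem.Chars.count cs [c] = cs.count c := by
  simp [PySem.Chars.count, count_go_singleton c cs cs.length 0 le_rfl]

-- A's loop computes the weighted character counts
theorem foldl_vowels (cs : List Char) (t : Int) :
    cs.foldl (fun total x =>
        if x ∈ (['a', 'e', 'i', 'o', 'u'] : List Char) then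
          total + (((((PySem.Dict.empty.insert 'a' (4:Int)).insert 'e' 3).insert 'i' 1).insert 'o' 0).insert 'u' 0).getD x 0
        else total) t
      = t + 4 * (cs.count 'a' : Int) + 3 * (cs.count 'e' : Int) + (cs.count 'i' : Int) := by
  have hva : (((((PySem.Dict.empty.insert 'a' (4:Int)).insert 'e' 3).insert 'i' 1).insert 'o' 0).insert 'u' 0).getD 'a' 0 = 4 := by decide
  have hve : (((((PySem.Dict.empty.insert 'a' (4:Int)).insert 'e' 3).insert 'i' 1).insert 'o' 0).insert 'u' 0).getD 'e' 0 = 3 := by decide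
  have hvi : (((((PySem.Dict.empty.insert 'a' (4:Int)).insert 'e' 3).insert 'i' 1).insert 'o' 0).insert 'u' 0).getD 'i' 0 = 1 := by decide
  have hvo : (((((PySem.Dict.empty.insert 'a' (4:Int)).insert 'e' 3).insert 'i' 1).insert 'o' 0).insert 'u' 0).getD 'o' 0 = 0 := by decide
  have hvu : (((((PySem.Dict.empty.insert 'a' (4:Int)).insert 'e' 3).insert 'i' 1).insert 'o' 0).insert 'u' 0).getD 'u' 0 = 0 := by decide
  induction cs generalizing t with
  | nil => simp
  | cons x cs ih =>
    simp only [List.foldl_cons, ih, List.count_cons]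
    by_cases ha : x = 'a'
    · subst ha; simp [hva]; ring
    by_cases he : x = 'e'
    · subst he; simp [hve]; ring
    by_cases hi : x = 'i'
    · subst hi; simp [hvi]; ring
    by_cases ho : x = 'o'
    · subst ho; simp [hvo]
    by_cases hu : x = 'u'
    · subst hu; simp [hvu]
    · simp [ha, he, hi, ho, hu]

-- ===== VERDICT (by name: the statement is the Claim_ definition above) =====
theorem sum_of_vowels_spec : Claim_equal_sum_of_vowels := by
  intro sentence _
  unfold Spec_sum_of_vowels sum_of_vowels sum_of_vowels_alt
  simp only [PySem.Str.count_eq]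
  rw [foldl_vowels]
  have h : ("a" : String).toList = ['a'] := rfl
  have h2 : ("e" : String).toList = ['e'] := rfl
  have h3 : ("i" : String).toList = ['i'] := rfl
  rw [h, h2, h3, count_singleton, count_singleton, count_singleton]
  ring
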